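-- pv_equiv track=rewrite | github.com/santhoshkammari/Llm_Finetuning | ai-document-extraction-main/src/utils/w2_dataset.py | get_w2_form_type
-- ===== SOURCE A (Python) =====
-- def get_w2_form_type(filename):
--     """
--     Args:
--             filename (str): The name of the file to parse.
--
--     Returns:
--             str or None: The token after 'input' in the filename, or None if 'input' is not found or filename is invalid.
--
--     Example:
--             'W2_Multi_Sample_Data_input_IRS2_clean_10391.png' -> 'IRS2'
--     """
--     if not filename or "input" not in filename:
--         return None
--     # Split the filename by '_' and find the token after 'input'
--     parts = filename.split("_")
--     for i, part in enumerate(parts):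
--         if part == "input" and i + 1 < len(parts):
--             return parts[i + 1]
--     return None
-- ===== SOURCE B (Python) =====
-- def get_w2_form_type(filename):
--     if not filename:
--         return None
--     cur = ""
--     after = False
--     for ch in filename:
--         if ch == "_":
--             if after:
--                 return cur
--             after = (cur == "input")
--             cur = ""
--         else:
--             cur += ch
--     return cur if after else None
-- ===== Notes on version B (the rewrite author's own statement) =====
-- stated objective: alternative
-- what changed: Replaced A's substring pre-check plus split('_') plus enumerate scan over the parts list by a single character-level state-machine pass that tracks the current token and whether the previous token was 'input'.
import Mathlib
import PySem

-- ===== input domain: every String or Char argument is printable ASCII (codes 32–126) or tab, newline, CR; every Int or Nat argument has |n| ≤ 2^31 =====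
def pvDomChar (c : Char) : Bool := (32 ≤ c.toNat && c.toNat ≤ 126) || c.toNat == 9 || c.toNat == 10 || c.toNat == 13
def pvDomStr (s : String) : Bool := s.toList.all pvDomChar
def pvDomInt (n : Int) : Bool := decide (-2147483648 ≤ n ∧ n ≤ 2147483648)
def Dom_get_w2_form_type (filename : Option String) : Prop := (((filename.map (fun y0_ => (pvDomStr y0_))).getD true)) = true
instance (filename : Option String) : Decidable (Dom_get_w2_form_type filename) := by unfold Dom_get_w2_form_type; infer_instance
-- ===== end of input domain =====

-- B replaces A's substring check + split('_') + enumerate scan by one character-level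
-- state-machine pass (objective: alternative; no speed claim).

-- ===== PORT A =====
-- the 'for i, part in enumerate(parts)' loop: first token equal to "input" that has a successor
def pvScanA : List (List Char) → Option String
  | [] => none
  | p :: rest =>
    if p = "input".toList ∧ rest ≠ [] then (rest.head?).map (fun t => String.ofList t)
    else pvScanA rest

def get_w2_form_type (filename : Option String) : Option String :=
  match filename with
  | none => none
  | some f =>
    if f.toList = [] ∨ PySem.Str.isIn "input" f = false then none
    else pvScanA (PySem.Chars.splitOn f.toList "_".toList)

-- ===== PORT B =====
-- the 'for ch in filename' state machine: cur = token so far, after = previous token was "input"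
def pvLoopB : List Char → List Char → Bool → Option String
  | [], cur, after => if after then some (String.ofList cur) else none
  | c :: rest, cur, after =>
    if c = '_' then
      if after then some (String.ofList cur)
      else pvLoopB rest [] (decide (cur = "input".toList))
    else pvLoopB rest (cur ++ [c]) after

def get_w2_form_type_alt (filename : Option String) : Option String :=
  match filename with
  | none => none
  | some f => if f.toList = [] then none else pvLoopB f.toList [] false

-- ===== PRECONDITION & SPEC =====
def Spec_get_w2_form_type (filename : Option String) (out : Option String) : Prop := out = get_w2_form_type_alt filename
instance (filename : Option String) (out : Option String) : Decidable (Spec_get_w2_form_type filename out) := by unfold Spec_get_w2_form_type; infer_instance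

-- ===== CLAIM (what is proved, stated in full; the proofs are below) =====
def Claim_equal_get_w2_form_type : Prop := ∀ (filename : Option String), Dom_get_w2_form_type filename → Spec_get_w2_form_type filename (get_w2_form_type filename)

-- ===== LEMMAS AND PROOFS =====

-- clean structural recursion equal to splitOn · ['_']
def pvConsHead (pre : List Char) : List (List Char) → List (List Char)
  | [] => [pre]
  | t :: ts => (pre ++ t) :: ts

def pvSplit : List Char → List (List Char)
  | [] => [[]]
  | c :: rest => if c = '_' then [] :: pvSplit rest else pvConsHead [c] (pvSplit rest)

theorem pvSplit_ne_nil (l : List Char) : pvSplit l ≠ [] := by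
  cases l with
  | nil => simp [pvSplit]
  | cons c rest =>
    simp only [pvSplit]
    split
    · simp
    · cases h : pvSplit rest <;> simp [pvConsHead]

theorem pvConsHead_nil_eq (ms : List (List Char)) (h : ms ≠ []) : pvConsHead [] ms = ms := by
  cases ms with
  | nil => exact absurd rfl h
  | cons t ts => simp [pvConsHead]

-- step equations for splitOn.go with separator ['_']
theorem go_nil (fuel : Nat) (cur : List Char) (acc : List (List Char)) :
    PySem.Chars.splitOn.go ['_'] fuel [] cur acc = (cur.reverse :: acc).reverse := by
  cases fuel with
  | zero => rw [PySem.Chars.splitOn.go]; simp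
  | succ f => rw [PySem.Chars.splitOn.go]; intro h; omega

theorem go_cons_us (fuel : Nat) (rest cur : List Char) (acc : List (List Char)) :
    PySem.Chars.splitOn.go ['_'] (fuel+1) ('_' :: rest) cur acc =
      PySem.Chars.splitOn.go ['_'] fuel rest [] (cur.reverse :: acc) := by
  rw [PySem.Chars.splitOn.go]
  simp [List.isPrefixOf]

theorem go_cons_ne (fuel : Nat) (c : Char) (rest cur : List Char) (acc : List (List Char))
    (hc : c ≠ '_') :
    PySem.Chars.splitOn.go ['_'] (fuel+1) (c :: rest) cur acc =
      PySem.Chars.splitOn.go ['_'] fuel rest (c :: cur) acc := by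
  rw [PySem.Chars.splitOn.go]
  simp [List.isPrefixOf]
  exact fun h => absurd h.symm hc

-- step equations for B's state machine
theorem loopB_us (rest cur : List Char) (after : Bool) :
    pvLoopB ('_' :: rest) cur after =
      if after then some (String.ofList cur) else pvLoopB rest [] (decide (cur = "input".toList)) := by
  simp [pvLoopB]

theorem loopB_ne (c : Char) (rest cur : List Char) (after : Bool) (hc : c ≠ '_') :
    pvLoopB (c :: rest) cur after = pvLoopB rest (cur ++ [c]) after := by
  simp [pvLoopB, hc]

theorem splitOn_go_spec (l : List Char) : ∀ (fuel : Nat) (cur : List Char) (acc : List (List Char)),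
    l.length < fuel →
    PySem.Chars.splitOn.go ['_'] fuel l cur acc = acc.reverse ++ pvConsHead cur.reverse (pvSplit l) := by
  induction l with
  | nil =>
    intro fuel cur acc h
    rw [go_nil]
    simp [pvSplit, pvConsHead]
  | cons c rest ih =>
    intro fuel cur acc h
    obtain ⟨f, rfl⟩ : ∃ f, fuel = f + 1 := ⟨fuel - 1, by omega⟩
    have hf : rest.length < f := by simpa using h
    by_cases hc : c = '_'
    · subst hc
      rw [go_cons_us, ih f [] (cur.reverse :: acc) hf]
      simp only [List.reverse_nil, pvSplit,
        pvConsHead, List.reverse_cons, List.append_assoc]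
      cases hps : pvSplit rest with
      | nil => exact absurd hps (pvSplit_ne_nil rest)
      | cons t ts => simp
    · rw [go_cons_ne f c rest cur acc hc, ih f (c :: cur) acc hf]
      simp only [pvSplit, if_neg hc]
      cases hps : pvSplit rest with
      | nil => exact absurd hps (pvSplit_ne_nil rest)
      | cons t ts => simp [pvConsHead]

theorem splitOn_eq_pvSplit (l : List Char) :
    PySem.Chars.splitOn l "_".toList = pvSplit l := by
  have h1 : "_".toList = ['_'] := rfl
  rw [h1]
  show PySem.Chars.splitOn.go ['_'] (l.length + 1) l [] [] = pvSplit l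
  rw [splitOn_go_spec l (l.length + 1) [] [] (by omega)]
  simp [pvConsHead_nil_eq _ (pvSplit_ne_nil l)]

-- once 'after' is set, B returns the current token completed to the next '_' (= head of the split)
theorem loopB_true (l : List Char) : ∀ (cur : List Char),
    pvLoopB l cur true = some (String.ofList (cur ++ (pvSplit l).headI)) := by
  induction l with
  | nil => intro cur; simp [pvLoopB, pvSplit]
  | cons c rest ih =>
    intro cur
    by_cases hc : c = '_'
    · subst hc; rw [loopB_us]; simp [pvSplit]
    · rw [loopB_ne c rest cur true hc, ih (cur ++ [c])]
      simp only [pvSplit, if_neg hc]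
      cases hps : pvSplit rest with
      | nil => exact absurd hps (pvSplit_ne_nil rest)
      | cons t ts => simp [pvConsHead]

-- main invariant: A's scan over the remaining tokens equals B's state machine with after = false
theorem scanA_eq_loopB (l : List Char) : ∀ (cur : List Char),
    pvScanA (pvConsHead cur (pvSplit l)) = pvLoopB l cur false := by
  induction l with
  | nil =>
    intro cur
    simp [pvSplit, pvConsHead, pvScanA, pvLoopB]
  | cons c rest ih =>
    intro cur
    by_cases hc : c = '_'
    · subst hc
      rw [loopB_us]
      simp only [Bool.false_eq_true, if_false]
      have h2 : pvSplit ('_' :: rest) = [] :: pvSplit rest := by simp [pvSplit]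
      rw [h2]
      show pvScanA ((cur ++ []) :: pvSplit rest) = _
      rw [List.append_nil]
      rw [show pvScanA (cur :: pvSplit rest) =
            (if cur = "input".toList ∧ pvSplit rest ≠ [] then
              ((pvSplit rest).head?).map (fun t => String.ofList t)
             else pvScanA (pvSplit rest)) from rfl]
      by_cases hcur : cur = "input".toList
      · rw [if_pos ⟨hcur, pvSplit_ne_nil rest⟩, decide_eq_true hcur, loopB_true]
        cases hps : pvSplit rest with
        | nil => exact absurd hps (pvSplit_ne_nil rest)
        | cons t ts => simp [List.headI]
      · rw [if_neg (fun h => hcur h.1), decide_eq_false hcur]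
        have := ih []
        rwa [pvConsHead_nil_eq _ (pvSplit_ne_nil rest)] at this
    · rw [loopB_ne c rest cur false hc, ← ih (cur ++ [c])]
      simp only [pvSplit, if_neg hc]
      cases hps : pvSplit rest with
      | nil => exact absurd hps (pvSplit_ne_nil rest)
      | cons t ts => simp [pvConsHead]

-- if B succeeds starting with accumulator cur, "input" occurs inside cur ++ remaining input
theorem loopB_some_infix (l : List Char) : ∀ (cur : List Char) (x : String),
    pvLoopB l cur false = some x → "input".toList <:+: cur ++ l := by
  induction l with
  | nil => intro cur x h; simp [pvLoopB] at h
  | cons c rest ih =>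
    intro cur x h
    by_cases hc : c = '_'
    · subst hc
      rw [loopB_us] at h
      simp only [Bool.false_eq_true, if_false] at h
      by_cases hcur : cur = "input".toList
      · exact ⟨[], '_' :: rest, by simp [hcur]⟩
      · rw [hcur |> decide_eq_false] at h
        have h3 := ih [] x h
        simp only [List.nil_append] at h3
        exact h3.trans ⟨cur ++ ['_'], [], by simp⟩
    · rw [loopB_ne c rest cur false hc] at h
      have := ih (cur ++ [c]) x h
      simpa using this

-- ===== VERDICT (by name: the statement is the Claim_ definition above) =====
theorem get_w2_form_type_spec : Claim_equal_get_w2_form_type := by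
  intro filename _
  unfold Spec_get_w2_form_type
  match filename with
  | none => rfl
  | some f =>
    show (if f.toList = [] ∨ PySem.Str.isIn "input" f = false then none
          else pvScanA (PySem.Chars.splitOn f.toList "_".toList)) =
         (if f.toList = [] then none else pvLoopB f.toList [] false)
    by_cases hnil : f.toList = []
    · simp [hnil]
    · rw [if_neg hnil]
      by_cases hin : PySem.Str.isIn "input" f = false
      · rw [if_pos (Or.inr hin)]
        cases hB : pvLoopB f.toList [] false with
        | none => rfl
        | some x =>
          have hinf := loopB_some_infix f.toList [] x hB
          simp only [List.nil_append] at hinf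
          have htrue : PySem.Chars.isIn "input".toList f.toList = true :=
            (PySem.Chars.isIn_iff_infix _ _).mpr hinf
          rw [PySem.Str.isIn_eq] at hin
          rw [hin] at htrue
          exact absurd htrue (by simp)
      · rw [if_neg (fun h => h.elim hnil hin)]
        rw [splitOn_eq_pvSplit]
        have := scanA_eq_loopB f.toList []
        rwa [pvConsHead_nil_eq _ (pvSplit_ne_nil f.toList)] at this
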